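-- pv_equiv track=rewrite | github.com/junhanhan/fail2fix | fail2fix.py | _truncate_after_pytest_summary
-- ===== SOURCE A (Python) =====
-- from typing import List, Optional
--
-- def _truncate_after_pytest_summary(snippet: List[str]) -> List[str]:
--     """
--     If snippet contains pytest summary markers, truncate soon after that.
--     Purpose: keep snippet "causally closed" and avoid unrelated tail noise.
--     """
--     stop_markers = [
--         "=========================== short test summary info",
--         "FAILED ",
--         "========================= 1 failed",
--         "========================= 2 failed",
--         "========================= 3 failed",
--         "========================= 4 failed",
--         "========================= 5 failed",
--     ]
--     last_idx = None
--     for i, line in enumerate(snippet):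
--         if any(m in line for m in stop_markers):
--             last_idx = i
--
--     if last_idx is None:
--         return snippet
--
--     # Keep at most 1 extra line after the last marker
--     end = min(len(snippet), last_idx + 2)
--     return snippet[:end]
-- ===== SOURCE B (Python) =====
-- from typing import List
--
-- def _truncate_after_pytest_summary(snippet: List[str]) -> List[str]:
--     stop_markers = [
--         "=========================== short test summary info",
--         "FAILED ",
--         "========================= 1 failed",
--         "========================= 2 failed",
--         "========================= 3 failed",
--         "========================= 4 failed",
--         "========================= 5 failed",
--     ]
--     # scan backwards; the first matching line from the end is the last marker
--     for i in range(len(snippet) - 1, -1, -1):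
--         if any(m in snippet[i] for m in stop_markers):
--             return snippet[:i + 2]
--     return snippet
-- ===== Notes on version B (the rewrite author's own statement) =====
-- stated objective: idiomatic
-- what changed: Replaces the forward pass that records every marker match with a backward scan that returns at the first matching line from the end, slicing directly (Python's slice clamps, so min(len, i+2) is unnecessary).
import Mathlib
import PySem

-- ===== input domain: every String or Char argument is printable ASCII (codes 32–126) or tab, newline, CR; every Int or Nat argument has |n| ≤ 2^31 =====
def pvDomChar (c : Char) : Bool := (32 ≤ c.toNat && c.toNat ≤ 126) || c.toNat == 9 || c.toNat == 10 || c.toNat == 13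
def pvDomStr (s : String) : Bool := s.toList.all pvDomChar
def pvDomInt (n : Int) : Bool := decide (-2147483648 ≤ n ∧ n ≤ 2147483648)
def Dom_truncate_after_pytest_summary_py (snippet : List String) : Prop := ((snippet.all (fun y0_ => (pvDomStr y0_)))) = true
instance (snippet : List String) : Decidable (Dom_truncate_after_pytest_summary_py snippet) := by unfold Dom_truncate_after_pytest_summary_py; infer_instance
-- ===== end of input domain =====

-- B scans backwards and returns at the first matching line from the end (same result; return value only).


-- ===== PORT A =====
def pvStopMarkers : List String :=
  [ "=========================== short test summary info",
    "FAILED ",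
    "========================= 1 failed",
    "========================= 2 failed",
    "========================= 3 failed",
    "========================= 4 failed",
    "========================= 5 failed" ]

def truncate_after_pytest_summary_py (snippet : List String) : List String :=
  let last_idx : Option Int :=
    (PySem.List.enumerate snippet 0).foldl
      (fun acc p =>
        if pvStopMarkers.any (fun m => PySem.Str.isIn m p.2) then some p.1 else acc)
      none
  match last_idx with
  | none => snippet
  | some i => PySem.List.slice snippet none (some (min (snippet.length : Int) (i + 2)))

-- ===== PORT B =====
def pvAltGo (snippet : List String) : List Int → List String
  | [] => snippet
  | i :: rest =>
    if pvStopMarkers.any (fun m => PySem.Str.isIn m (PySem.List.pyGetD snippet i "")) then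
      PySem.List.slice snippet none (some (i + 2))
    else pvAltGo snippet rest

def truncate_after_pytest_summary_py_alt (snippet : List String) : List String :=
  pvAltGo snippet (PySem.List.pyRange ((snippet.length : Int) - 1) (-1) (-1))

-- ===== PRECONDITION & SPEC =====
def Spec_truncate_after_pytest_summary_py (snippet : List String) (out : List String) : Prop := out = truncate_after_pytest_summary_py_alt snippet
instance (snippet : List String) (out : List String) : Decidable (Spec_truncate_after_pytest_summary_py snippet out) := by unfold Spec_truncate_after_pytest_summary_py; infer_instance

-- ===== CLAIM (what is proved, stated in full; the proofs are below) =====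
def Claim_equal_truncate_after_pytest_summary_py : Prop := ∀ (snippet : List String), Dom_truncate_after_pytest_summary_py snippet → Spec_truncate_after_pytest_summary_py snippet (truncate_after_pytest_summary_py snippet)

-- ===== LEMMAS AND PROOFS =====

/-- whether a line contains one of the stop markers -/
def pvHit (line : String) : Bool := pvStopMarkers.any (fun m => PySem.Str.isIn m line)

/-- index of the last line satisfying `pvHit`, if any -/
def pvLastHit? : List String → Option Nat
  | [] => none
  | x :: xs =>
    match pvLastHit? xs with
    | some k => some (k + 1)
    | none => if pvHit x then some 0 else none

theorem pvLastHit?_snoc (ys : List String) (y : String) :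
    pvLastHit? (ys ++ [y]) = if pvHit y then some ys.length else pvLastHit? ys := by
  induction ys with
  | nil => rfl
  | cons a as ih =>
    simp only [List.cons_append, pvLastHit?, ih]
    by_cases h : pvHit y <;> simp [h] <;> cases pvLastHit? as <;> simp

theorem pvFoldA (xs : List String) (s : Int) (acc : Option Int) :
    (PySem.List.enumerate xs s).foldl
      (fun acc p =>
        if pvStopMarkers.any (fun m => PySem.Str.isIn m p.2) then some p.1 else acc)
      acc
    = match pvLastHit? xs with
      | some k => some (s + k)
      | none => acc := by
  induction xs generalizing s acc with
  | nil => simp [PySem.List.enumerate_nil, pvLastHit?]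
  | cons x xs ih =>
    rw [PySem.List.enumerate_cons]
    simp only [List.foldl_cons, ih]
    show (match pvLastHit? xs with
          | some k => some (s + 1 + k)
          | none => if pvHit x then some s else acc) = _
    cases h : pvLastHit? xs with
    | some k => simp [pvLastHit?, h]; ring
    | none =>
      by_cases hx : pvHit x <;> simp [pvLastHit?, h, hx]

theorem pvAltGoSpec (xs : List String) (j : Nat) (hj : j ≤ xs.length) :
    pvAltGo xs (PySem.List.pyRange ((j : Int) - 1) (-1) (-1))
    = match pvLastHit? (xs.take j) with
      | some k => PySem.List.slice xs none (some ((k : Int) + 2))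
      | none => xs := by
  induction j with
  | zero => simp [PySem.List.pyRange_neg_one_eq_nil (by omega : (0:Int) - 1 ≤ -1), pvAltGo, pvLastHit?]
  | succ j ih =>
    have hjlt : j < xs.length := by omega
    rw [show ((j + 1 : Nat) : Int) - 1 = (j : Int) by push_cast; ring,
        PySem.List.pyRange_neg_one_cons (by omega : (-1:Int) < (j : Int))]
    have htake : xs.take (j + 1) = xs.take j ++ [xs[j]] := by
      rw [List.take_succ]; simp [List.getElem?_eq_getElem hjlt]
    have hget : PySem.List.pyGetD xs (j : Int) "" = xs[j] := by
      rw [PySem.List.pyGetD_of_nonneg xs "" (by omega)]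
      simp [List.getD_eq_getElem?_getD, List.getElem?_eq_getElem hjlt]
    have hlen : (List.take j xs).length = j := by
      simp [Nat.min_eq_left (le_of_lt hjlt)]
    rw [pvAltGo, hget, htake, pvLastHit?_snoc, hlen]
    simp only [pvHit]
    by_cases hx : (pvStopMarkers.any fun m => PySem.Str.isIn m xs[j]) = true
    · rw [if_pos hx, if_pos hx]
    · rw [if_neg hx, if_neg hx, ih (le_of_lt hjlt)]

theorem pvSliceMin (xs : List String) (k : Nat) :
    PySem.List.slice xs none (some (min (xs.length : Int) ((k : Int) + 2)))
    = PySem.List.slice xs none (some ((k : Int) + 2)) := by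
  rw [PySem.List.slice_to xs (by omega), PySem.List.slice_to xs (by omega)]
  rcases le_or_gt ((xs.length : Int)) ((k : Int) + 2) with h | h
  · rw [min_eq_left h]
    rw [List.take_of_length_le (by omega), List.take_of_length_le (by omega)]
  · rw [min_eq_right (le_of_lt h)]

-- ===== VERDICT (by name: the statement is the Claim_ definition above) =====
theorem truncate_after_pytest_summary_py_spec : Claim_equal_truncate_after_pytest_summary_py := by
  intro snippet _
  unfold Spec_truncate_after_pytest_summary_py truncate_after_pytest_summary_py
        truncate_after_pytest_summary_py_alt
  rw [pvFoldA, pvAltGoSpec snippet snippet.length le_rfl]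
  simp only [List.take_length]
  cases h : pvLastHit? snippet with
  | none => simp [h]
  | some k =>
    simp only [h, zero_add]
    exact pvSliceMin snippet k
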